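-- pv_equiv track=rewrite | github.com/secthunter/Best_Hacker_in_the_world | quantum_mathematical_analyzer.py | _find_alternating
-- ===== SOURCE A (Python) =====
-- def _find_alternating(bits):
--     """Find alternating sequences"""
--     alternating = []
--     current_length = 0
--
--     for i in range(len(bits) - 1):
--         if bits[i] != bits[i + 1]:
--             current_length += 1
--         else:
--             if current_length > 0:
--                 alternating.append(current_length)
--             current_length = 0
--
--     return alternating
-- ===== SOURCE B (Python) =====
-- def _find_alternating(bits):
--     """Find alternating sequences"""
--     # run-length encode the adjacent-inequality list, then emit True-run lengths
--     diffs = [a != b for a, b in zip(bits, bits[1:])]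
--     runs = []
--     for d in diffs:
--         if runs and runs[-1][0] == d:
--             runs[-1] = (d, runs[-1][1] + 1)
--         else:
--             runs.append((d, 1))
--     return [n for v, n in runs[:-1] if v]
-- ===== Notes on version B (the rewrite author's own statement) =====
-- stated objective: alternative
-- what changed: Replaces A's index loop with mutable counter state by a pipeline: build the adjacent-inequality list via zip, run-length-encode it, then emit the True-run lengths of all but the final run.
import Mathlib
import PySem

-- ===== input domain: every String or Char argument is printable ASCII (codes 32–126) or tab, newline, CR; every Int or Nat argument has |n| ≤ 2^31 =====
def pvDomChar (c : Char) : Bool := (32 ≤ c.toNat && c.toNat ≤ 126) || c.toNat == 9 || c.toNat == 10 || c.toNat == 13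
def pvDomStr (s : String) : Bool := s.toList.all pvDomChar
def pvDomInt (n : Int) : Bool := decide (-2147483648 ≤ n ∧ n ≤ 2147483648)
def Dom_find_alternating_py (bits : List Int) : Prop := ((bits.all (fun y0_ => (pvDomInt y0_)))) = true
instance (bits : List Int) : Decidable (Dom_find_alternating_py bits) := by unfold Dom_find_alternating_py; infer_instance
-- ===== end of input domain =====

-- B replaces A's stateful index loop by a diffs-list + run-length-encoding decomposition (objective: alternative/simpler decomposition).

-- ===== PORT A =====
-- literal port of A: loop over i in range(len(bits)-1) with state (alternating, current_length)
def find_alternating_py (bits : List Int) : List Int :=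
  ((PySem.List.pyRange 0 ((bits.length : Int) - 1) 1).foldl
    (fun (st : List Int × Int) (i : Int) =>
      if PySem.List.pyGetD bits i 0 ≠ PySem.List.pyGetD bits (i + 1) 0 then
        (st.1, st.2 + 1)
      else
        if st.2 > 0 then (st.1 ++ [st.2], 0) else (st.1, 0))
    ([], 0)).1

-- ===== PORT B =====
-- runs accumulator kept reversed (cons + update head = Python's append / update last), reversed at the end
def pvRunStep (acc : List (Bool × Int)) (d : Bool) : List (Bool × Int) :=
  match acc with
  | (v, n) :: rest => if d = v then (v, n + 1) :: rest else (d, 1) :: (v, n) :: rest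
  | [] => [(d, 1)]

-- runs[:-1] filtered to True runs, lengths only
def pvEmitRuns (runs : List (Bool × Int)) : List Int :=
  (runs.take (runs.length - 1)).filterMap (fun p => if p.1 then some p.2 else none)

def find_alternating_py_alt (bits : List Int) : List Int :=
  let diffs := List.zipWith (fun a b => decide (a ≠ b)) bits bits.tail
  pvEmitRuns ((diffs.foldl pvRunStep []).reverse)

-- ===== PRECONDITION & SPEC =====
def Spec_find_alternating_py (bits : List Int) (out : List Int) : Prop := out = find_alternating_py_alt bits
instance (bits : List Int) (out : List Int) : Decidable (Spec_find_alternating_py bits out) := by unfold Spec_find_alternating_py; infer_instance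

-- ===== CLAIM (what is proved, stated in full; the proofs are below) =====
def Claim_equal_find_alternating_py : Prop := ∀ (bits : List Int), Dom_find_alternating_py bits → Spec_find_alternating_py bits (find_alternating_py bits)

-- ===== LEMMAS AND PROOFS =====

-- emission function of A's loop as a recursion over the diffs list, with current_length as parameter
def pvHEmit : List Bool → Int → List Int
  | [], _ => []
  | true :: ds, cl => pvHEmit ds (cl + 1)
  | false :: ds, cl => (if cl > 0 then [cl] else []) ++ pvHEmit ds 0

-- emission function of B's runs loop: head run has value v and length n
def pvGEmit : List Bool → Bool → Int → List Int
  | [], _, _ => []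
  | d :: ds, v, n => if d = v then pvGEmit ds v (n + 1) else (if v then [n] else []) ++ pvGEmit ds d 1

def pvTrueLens (l : List (Bool × Int)) : List Int :=
  l.filterMap (fun p => if p.1 then some p.2 else none)

lemma pvEmitRuns_append_last (xs : List (Bool × Int)) (p : Bool × Int) :
    pvEmitRuns (xs ++ [p]) = pvTrueLens xs := by
  simp [pvEmitRuns, pvTrueLens]

-- A's index loop equals the structural recursion over diffs
lemma pvA_loop (bits : List Int) (a : Nat) (acc : List Int) (cl : Int) :
    ((PySem.List.pyRange (a : Int) ((bits.length : Int) - 1) 1).foldl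
      (fun (st : List Int × Int) (i : Int) =>
        if PySem.List.pyGetD bits i 0 ≠ PySem.List.pyGetD bits (i + 1) 0 then
          (st.1, st.2 + 1)
        else
          if st.2 > 0 then (st.1 ++ [st.2], 0) else (st.1, 0))
      (acc, cl)).1
    = acc ++ pvHEmit ((List.zipWith (fun a b => decide (a ≠ b)) bits bits.tail).drop a) cl := by
  by_cases h : a + 1 < bits.length
  · have hlt : (a : Int) < (bits.length : Int) - 1 := by omega
    rw [PySem.List.pyRange_one_cons hlt]
    have h1 : a < bits.length := by omega
    have h2 : a + 1 < bits.length := h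
    have g1 : PySem.List.pyGetD bits (a : Int) 0 = bits[a] := by
      simpa using PySem.List.pyGetD_natCast (xs := bits) (n := a) (d := 0)
        |>.trans (List.getD_eq_getElem bits 0 h1)
    have g2 : PySem.List.pyGetD bits ((a : Int) + 1) 0 = bits[a + 1] := by
      have : ((a : Int) + 1) = ((a + 1 : Nat) : Int) := by push_cast; ring
      rw [this]
      simpa using PySem.List.pyGetD_natCast (xs := bits) (n := a + 1) (d := 0)
        |>.trans (List.getD_eq_getElem bits 0 h2)
    have hd : a < (List.zipWith (fun a b => decide (a ≠ b)) bits bits.tail).length := by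
      simp [List.length_zipWith, List.length_tail]; omega
    have hdrop : (List.zipWith (fun a b => decide (a ≠ b)) bits bits.tail).drop a
        = decide (bits[a] ≠ bits[a + 1]) ::
          (List.zipWith (fun a b => decide (a ≠ b)) bits bits.tail).drop (a + 1) := by
      rw [List.drop_eq_getElem_cons hd]
      congr 1
      rw [List.getElem_zipWith]
      congr 1
      rw [List.getElem_tail]
    rw [hdrop]
    simp only [List.foldl_cons, g1, g2]
    by_cases hne : bits[a] ≠ bits[a + 1]
    · simp only [if_pos hne, decide_eq_true hne]
      have := pvA_loop bits (a + 1) acc (cl + 1)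
      rw [pvHEmit]
      push_cast at this ⊢
      exact this
    · simp only [if_neg hne]
      have hdec : decide (bits[a] ≠ bits[a + 1]) = false := by
        simp at hne; simp [hne]
      rw [hdec, pvHEmit]
      by_cases hcl : cl > 0
      · simp only [if_pos hcl]
        have := pvA_loop bits (a + 1) (acc ++ [cl]) 0
        push_cast at this ⊢
        rw [this, List.append_assoc]
      · simp only [if_neg hcl]
        have := pvA_loop bits (a + 1) acc 0
        push_cast at this ⊢
        simpa using this
  · have hnil : PySem.List.pyRange (a : Int) ((bits.length : Int) - 1) 1 = [] :=
      PySem.List.pyRange_one_eq_nil (by omega)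
    have hdnil : (List.zipWith (fun a b => decide (a ≠ b)) bits bits.tail).drop a = [] := by
      apply List.drop_eq_nil_of_le
      simp [List.length_zipWith, List.length_tail]; omega
    rw [hnil, hdnil]
    simp [pvHEmit]
termination_by bits.length - a

-- B's runs loop: emitted output in terms of pvGEmit, for a non-empty accumulator
lemma pvB_loop (ds : List Bool) (v : Bool) (n : Int) (rest : List (Bool × Int)) :
    pvEmitRuns ((ds.foldl pvRunStep ((v, n) :: rest)).reverse)
    = pvTrueLens rest.reverse ++ pvGEmit ds v n := by
  induction ds generalizing v n rest with
  | nil => simp [pvGEmit, pvEmitRuns_append_last]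
  | cons d ds ih =>
    rw [List.foldl_cons, pvRunStep, pvGEmit]
    by_cases hdv : d = v
    · simp only [hdv]
      exact ih v (n + 1) rest
    · simp only [if_neg hdv]
      rw [ih d 1 ((v, n) :: rest)]
      simp [pvTrueLens, List.filterMap_append]
      cases v <;> simp

-- the two emission recursions agree
lemma pvGH (ds : List Bool) :
    (∀ n : Int, 1 ≤ n → pvGEmit ds true n = pvHEmit ds n) ∧
    (∀ m : Int, pvGEmit ds false m = pvHEmit ds 0) := by
  induction ds with
  | nil => constructor <;> intros <;> simp [pvGEmit, pvHEmit]
  | cons d ds ih =>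
    constructor
    · intro n hn
      cases d
      · rw [pvGEmit, pvHEmit]
        simp only [if_neg (by simp : ¬ (false = true))]
        rw [if_pos (by omega : n > 0), ih.2 1]
        simp
      · rw [pvGEmit, pvHEmit]
        simp only [if_true]
        exact ih.1 (n + 1) (by omega)
    · intro m
      cases d
      · rw [pvGEmit, pvHEmit]
        simp only [if_true]
        have : ¬ ((0 : Int) > 0) := by omega
        rw [if_neg this, ih.2 (m + 1)]
        simp
      · rw [pvGEmit, pvHEmit]
        simp only [if_neg (by simp : ¬ (true = false))]
        rw [ih.1 1 (by omega)]
        simp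

-- ===== VERDICT (by name: the statement is the Claim_ definition above) =====
theorem find_alternating_py_spec : Claim_equal_find_alternating_py := by
  intro bits _
  unfold Spec_find_alternating_py find_alternating_py find_alternating_py_alt
  have hA := pvA_loop bits 0 [] 0
  simp only [Nat.cast_zero, List.drop_zero, List.nil_append] at hA
  rw [hA]
  cases hds : List.zipWith (fun a b => decide (a ≠ b)) bits bits.tail with
  | nil => simp [pvHEmit, pvEmitRuns]
  | cons d ds =>
    show pvHEmit (d :: ds) 0 = pvEmitRuns (((d :: ds).foldl pvRunStep []).reverse)
    rw [List.foldl_cons, pvRunStep, pvB_loop]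
    simp only [List.reverse_nil, pvTrueLens, List.filterMap_nil, List.nil_append]
    cases d
    · rw [pvHEmit, (pvGH ds).2 1]
      simp
    · rw [pvHEmit, (pvGH ds).1 1 (by omega)]
      norm_num
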